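-- pv_equiv track=rewrite | github.com/SafeguardLi/Security_of_CP-DRL-TSC | src/CTM.py | cell2direction
-- ===== SOURCE A (Python) =====
-- def cell2direction(i):
--     ranges_to_directions = {
--         (106, 109): 0,
--         (102, 105): 1,
--         (89, 97): 2, (98, 101): 2,
--         (44, 45): 3,
--         (29, 39): 4, (42, 43): 4,
--         (40, 41): 5,
--         (59, 69): 6, (72, 75): 6,
--         (70, 71): 7,
--         (1, 12): 8, (14, 15): 8,
--         (13, 13): 9
--     }
--     for range_tuple, direction in ranges_to_directions.items():
--         if range_tuple[0] <= i <= range_tuple[1]: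
--             return direction
--     return None
-- ===== SOURCE B (Python) =====
-- # Direction lookup precomputed as a dense digit string indexed by cell id; '.' marks no direction.
-- _DIRS = ".888888888888988.............44444444444554433.............66666666666776666.............222222222222211110000"
--
-- def cell2direction(i):
--     if 0 <= i < len(_DIRS):
--         ch = _DIRS[i]
--         if ch != '.':
--             return int(ch)
--     return None
-- ===== Notes on version B (the rewrite author's own statement) =====
-- stated objective: alternative
-- what changed: B replaces the per-call scan over (lo,hi) ranges with a single indexed access into a precomputed dense table (a digit string covering cells 0..109), so no range-containment loop remains.
import Mathlib
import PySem

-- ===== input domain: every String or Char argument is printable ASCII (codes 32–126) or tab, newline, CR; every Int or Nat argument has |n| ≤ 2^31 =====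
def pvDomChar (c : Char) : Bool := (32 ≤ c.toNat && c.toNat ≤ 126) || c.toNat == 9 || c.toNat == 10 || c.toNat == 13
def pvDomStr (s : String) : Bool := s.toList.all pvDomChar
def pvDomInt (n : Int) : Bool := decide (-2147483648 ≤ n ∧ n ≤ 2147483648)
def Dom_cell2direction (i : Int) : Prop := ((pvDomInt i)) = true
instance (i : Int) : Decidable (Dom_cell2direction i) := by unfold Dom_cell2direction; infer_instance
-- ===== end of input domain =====

-- B answers by one indexed access into a precomputed dense digit-string table (cells 0..109) instead of scanning the (lo,hi) ranges per call.


-- ===== PORT A =====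
-- the dict literal of A, iterated in insertion order
def pvRangesA : List ((Int × Int) × Int) :=
  [((106, 109), 0), ((102, 105), 1), ((89, 97), 2), ((98, 101), 2),
   ((44, 45), 3), ((29, 39), 4), ((42, 43), 4), ((40, 41), 5),
   ((59, 69), 6), ((72, 75), 6), ((70, 71), 7), ((1, 12), 8),
   ((14, 15), 8), ((13, 13), 9)]

-- the for-loop with early return
def pvLoopA (i : Int) : List ((Int × Int) × Int) → Option Int
  | [] => none
  | ((lo, hi), d) :: rest => if lo ≤ i ∧ i ≤ hi then some d else pvLoopA i rest

def cell2direction (i : Int) : Option Int := pvLoopA i pvRangesA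

-- ===== PORT B =====
-- _DIRS: the dense table, '.' = no direction
def pvDirs : String := ".888888888888988.............44444444444554433.............66666666666776666.............222222222222211110000"

-- int(ch): inside the guard ch is a decimal digit, so int(ch) always returns;
-- PySem.Int.ofStr? is exact there (some of the digit's value).
def cell2direction_alt (i : Int) : Option Int :=
  if 0 ≤ i ∧ i < PySem.Str.len pvDirs then
    match PySem.Str.pyGet? pvDirs i with
    | some ch => if ch ≠ '.' then PySem.Int.ofStr? (String.ofList [ch]) else none
    | none => none
  else none

-- ===== PRECONDITION & SPEC =====
def Spec_cell2direction (i : Int) (out : Option Int) : Prop := out = cell2direction_alt i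
instance (i : Int) (out : Option Int) : Decidable (Spec_cell2direction i out) := by unfold Spec_cell2direction; infer_instance

-- ===== CLAIM (what is proved, stated in full; the proofs are below) =====
def Claim_equal_cell2direction : Prop := ∀ (i : Int), Dom_cell2direction i → Spec_cell2direction i (cell2direction i)

-- ===== LEMMAS AND PROOFS =====

-- agreement on the band 0 ≤ i ≤ 110, pointwise by the kernel
set_option maxRecDepth 10000 in
set_option maxHeartbeats 2000000 in
theorem pv_agree_small : ∀ n : Nat, n < 111 →
    cell2direction (n : Int) = cell2direction_alt (n : Int) := by decide

-- A's scan returns none outside every range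
set_option maxHeartbeats 1000000 in
theorem pvLoopA_none (i : Int) (h : i < 0 ∨ 110 ≤ i) : pvLoopA i pvRangesA = none := by
  rw [pvRangesA]
  repeat rw [pvLoopA, if_neg (by omega)]
  rfl

theorem pvDirs_len : PySem.Str.len pvDirs = 110 := by decide

-- ===== VERDICT (by name: the statement is the Claim_ definition above) =====
theorem cell2direction_spec : Claim_equal_cell2direction := by
  intro i _
  unfold Spec_cell2direction
  by_cases h : 0 ≤ i ∧ i < 110
  · obtain ⟨h0, h1⟩ := h
    have := pv_agree_small i.toNat (by omega)
    rwa [Int.toNat_of_nonneg h0] at this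
  · have h' : i < 0 ∨ 110 ≤ i := by omega
    show cell2direction i = cell2direction_alt i
    rw [cell2direction, cell2direction_alt, pvLoopA_none i h', pvDirs_len,
      if_neg (by omega)]
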